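-- pv_equiv track=rewrite | github.com/gomesmr/java-modernizator | application/steps/refactoring_step.py | _extract_file_analysis
-- ===== SOURCE A (Python) =====
-- from typing import Dict, Any
--
-- def _extract_file_analysis(
--
--         file_path: str,
--         analysis_data: Dict[str, Any]
-- ) -> str:
--     result = analysis_data.get('result', '')
--
--     if file_path in result:
--         lines = result.split('\n')
--         relevant_lines = []
--         capturing = False
--
--         for line in lines:
--             if file_path in line:
--                 capturing = True
--             elif capturing and line.startswith('##'):
--                 break
--             elif capturing:
--                 relevant_lines.append(line)
--
--         return '\n'.join(relevant_lines) if relevant_lines else result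
--
--     return result
-- ===== SOURCE B (Python) =====
-- def _extract_file_analysis(
--         file_path: str,
--         analysis_data
-- ) -> str:
--     result = analysis_data.get('result', '')
--
--     if file_path not in result:
--         return result
--
--     lines = result.split('\n')
--     idx = next((i for i, l in enumerate(lines) if file_path in l), None)
--     if idx is None:
--         return result
--
--     tail = lines[idx + 1:]
--     end = next((j for j, l in enumerate(tail)
--                 if l.startswith('##') and file_path not in l), len(tail))
--     section = [l for l in tail[:end] if file_path not in l]
--     return '\n'.join(section) if section else result
-- ===== Notes on version B (the rewrite author's own statement) =====
-- stated objective: alternative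
-- what changed: A's stateful flag-driven loop is replaced by index arithmetic over the split lines: find the index of the first marker line, slice the tail after it, compute the end index of the section as the first '##' heading that is not itself a marker line, then build the section by slicing tail[:end] and filtering out marker lines with a comprehension.
import Mathlib
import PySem

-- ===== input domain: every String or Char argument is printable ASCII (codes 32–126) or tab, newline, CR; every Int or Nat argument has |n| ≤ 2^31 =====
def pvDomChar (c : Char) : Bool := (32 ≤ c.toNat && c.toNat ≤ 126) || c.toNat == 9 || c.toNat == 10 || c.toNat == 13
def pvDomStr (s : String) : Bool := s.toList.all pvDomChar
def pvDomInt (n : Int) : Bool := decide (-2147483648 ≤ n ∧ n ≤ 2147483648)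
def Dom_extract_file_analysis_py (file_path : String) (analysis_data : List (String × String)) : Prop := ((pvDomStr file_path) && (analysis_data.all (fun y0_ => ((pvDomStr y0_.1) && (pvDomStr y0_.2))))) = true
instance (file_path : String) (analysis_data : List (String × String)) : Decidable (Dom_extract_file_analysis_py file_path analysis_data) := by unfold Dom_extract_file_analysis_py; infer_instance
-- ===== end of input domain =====

-- ===== PORT A =====
-- B replaces A's stateful capturing-flag loop with index arithmetic: find the first marker
-- index, slice the tail, compute the section's end index, slice and filter (alternative, same cost).
def pvALoop (file_path : String) : List String → Bool → List String → List String
  | [], _, acc => acc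
  | l :: ls, capturing, acc =>
    if PySem.Str.isIn file_path l then pvALoop file_path ls true acc
    else if capturing && PySem.Str.startswith l "##" then acc
    else if capturing then pvALoop file_path ls capturing (acc ++ [l])
    else pvALoop file_path ls capturing acc

def extract_file_analysis_py (file_path : String) (analysis_data : List (String × String)) : String :=
  let result := (PySem.Dict.mk analysis_data).getD "result" ""
  if PySem.Str.isIn file_path result then
    -- result.split('\n'); split? is never none since the separator "\n" is nonempty
    let lines := (PySem.Str.split? result "\n").getD []
    let relevant_lines := pvALoop file_path lines false []
    if relevant_lines ≠ [] then PySem.Str.join "\n" relevant_lines else result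
  else result

-- ===== PORT B =====
def extract_file_analysis_py_alt (file_path : String) (analysis_data : List (String × String)) : String :=
  let result := (PySem.Dict.mk analysis_data).getD "result" ""
  if !(PySem.Str.isIn file_path result) then result
  else
    let lines := (PySem.Str.split? result "\n").getD []
    -- idx = next((i for i, l in enumerate(lines) if file_path in l), None)
    match lines.findIdx? (fun l => PySem.Str.isIn file_path l) with
    | none => result
    | some i =>
      -- tail = lines[idx + 1:]  (idx ≥ 0, so the slice is a drop)
      let tail := lines.drop (i + 1)
      -- end = next((j ... if l.startswith('##') and file_path not in l), len(tail))
      let e := (tail.findIdx? (fun l => PySem.Str.startswith l "##" && !(PySem.Str.isIn file_path l))).getD tail.length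
      -- section = [l for l in tail[:end] if file_path not in l]
      let section_ := (tail.take e).filter (fun l => !(PySem.Str.isIn file_path l))
      if section_ ≠ [] then PySem.Str.join "\n" section_ else result

-- ===== PRECONDITION & SPEC =====
def Spec_extract_file_analysis_py (file_path : String) (analysis_data : List (String × String)) (out : String) : Prop := out = extract_file_analysis_py_alt file_path analysis_data
instance (file_path : String) (analysis_data : List (String × String)) (out : String) : Decidable (Spec_extract_file_analysis_py file_path analysis_data out) := by unfold Spec_extract_file_analysis_py; infer_instance

-- ===== CLAIM (what is proved, stated in full; the proofs are below) =====
def Claim_equal_extract_file_analysis_py : Prop := ∀ (file_path : String) (analysis_data : List (String × String)), Dom_extract_file_analysis_py file_path analysis_data → Spec_extract_file_analysis_py file_path analysis_data (extract_file_analysis_py file_path analysis_data)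

-- ===== LEMMAS AND PROOFS =====
theorem pvFindIdxGetD_cons_false {a : Type} (p : a → Bool) (l : a) (ls : List a) (h : p l = false) :
    ((List.findIdx? p (l :: ls)).getD (l :: ls).length) = ((List.findIdx? p ls).getD ls.length) + 1 := by
  rw [List.findIdx?_cons, h]
  cases List.findIdx? p ls <;> simp

-- with the flag on, A's loop produces exactly B's take-then-filter section
theorem pvALoop_true_eq (file_path : String) (ls : List String) (acc : List String) :
    pvALoop file_path ls true acc =
      acc ++ (ls.take ((ls.findIdx? (fun l => PySem.Str.startswith l "##" && !(PySem.Str.isIn file_path l))).getD ls.length)).filter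
        (fun l => !(PySem.Str.isIn file_path l)) := by
  induction ls generalizing acc with
  | nil => simp [pvALoop]
  | cons l ls ih =>
    by_cases h1 : PySem.Chars.isIn file_path.toList l.toList = true
    · rw [pvFindIdxGetD_cons_false _ _ _ (by simp [PySem.Str.isIn_eq, h1])]
      simp [pvALoop, h1, ih]
    · by_cases h2 : PySem.Chars.startswith l.toList ['#', '#'] = true
      · simp [pvALoop, List.findIdx?_cons, h1, h2]
      · rw [pvFindIdxGetD_cons_false _ _ _ (by simp [PySem.Str.startswith_eq, h2])]
        simp [pvALoop, h1, h2, ih]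

-- with the flag off, A's loop is B's marker search followed by the flag-on phase on the tail
theorem pvALoop_false_eq (file_path : String) (ls : List String) :
    pvALoop file_path ls false [] =
      match ls.findIdx? (fun l => PySem.Str.isIn file_path l) with
      | none => []
      | some i => pvALoop file_path (ls.drop (i + 1)) true [] := by
  induction ls with
  | nil => rfl
  | cons l ls ih =>
    by_cases h1 : PySem.Chars.isIn file_path.toList l.toList = true
    · simp [pvALoop, List.findIdx?_cons, h1]
    · rw [show pvALoop file_path (l :: ls) false [] = pvALoop file_path ls false [] by
        simp [pvALoop, h1], ih, List.findIdx?_cons]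
      simp only [PySem.Str.isIn_eq, h1, Bool.false_eq_true, if_false]
      cases hfi : List.findIdx? (fun l => PySem.Chars.isIn file_path.toList l.toList) ls <;>
        simp_all

-- ===== VERDICT (by name: the statement is the Claim_ definition above) =====
theorem extract_file_analysis_py_spec : Claim_equal_extract_file_analysis_py := by
  intro file_path analysis_data _
  unfold Spec_extract_file_analysis_py extract_file_analysis_py extract_file_analysis_py_alt
  by_cases h1 : PySem.Str.isIn file_path ((PySem.Dict.mk analysis_data).getD "result" "") = true
  · simp only [h1, if_true, Bool.not_true, Bool.false_eq_true, if_false]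
    rw [pvALoop_false_eq]
    cases hf : ((PySem.Str.split? ((PySem.Dict.mk analysis_data).getD "result" "") "\n").getD []).findIdx? (fun l => PySem.Str.isIn file_path l) with
    | none => simp
    | some i => simp only [pvALoop_true_eq, List.nil_append]
  · simp only [h1, Bool.false_eq_true, if_false, Bool.not_false, if_true]
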